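-- pv_equiv track=rewrite | github.com/Starkilk/DigitalDepartment | sixtytasks/lists3.1.py | sortEvenNumbers
-- ===== SOURCE A (Python) =====
-- def sortEvenNumbers(arr):
--     even_numbers = [num for num in arr if num % 2 == 0]  # список с четными числами
--     sorted_numbers = sorted(even_numbers)  # список отсортированных четных чисел
--     result = []
--     index = 0
--     # идём по изначальному массиву. если элемент чётный то берём его из отсортированного четного списка, если идёт нечетный, то вставляем элемент из изначального массива(как порядок нечётных чисел не нарушится)
--     for num in arr:
--         if num % 2 == 0:
--             result.append(sorted_numbers[index])
--             index += 1
--         else: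
--             result.append(num)
--     return result
-- ===== SOURCE B (Python) =====
-- def sortEvenNumbers(arr):
--     # Hand-rolled top-down merge sort of the even values, then the
--     # result is assembled BACK-TO-FRONT: walk the input in reverse, popping the
--     # largest remaining even for each even slot, and reverse at the end.
--     def merge(xs, ys):
--         out = []
--         i = j = 0
--         while i < len(xs) and j < len(ys):
--             if ys[j] < xs[i]:
--                 out.append(ys[j])
--                 j += 1
--             else:
--                 out.append(xs[i])
--                 i += 1
--         out.extend(xs[i:])
--         out.extend(ys[j:])
--         return out
--
--     def msort(xs):
--         if len(xs) < 2:
--             return xs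
--         mid = len(xs) // 2
--         return merge(msort(xs[:mid]), msort(xs[mid:]))
--
--     evens = msort([x for x in arr if x % 2 == 0])
--     out = []
--     for x in reversed(arr):
--         out.append(evens.pop() if x % 2 == 0 else x)
--     out.reverse()
--     return out
-- ===== Notes on version B (the rewrite author's own statement) =====
-- stated objective: alternative
-- what changed: B replaces the builtin sorted() with a hand-written top-down merge sort of the even values and assembles the result back-to-front, walking the input in reverse and popping the largest remaining even value for each even slot, instead of A's forward pass indexing into the sorted list.
import Mathlib
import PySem

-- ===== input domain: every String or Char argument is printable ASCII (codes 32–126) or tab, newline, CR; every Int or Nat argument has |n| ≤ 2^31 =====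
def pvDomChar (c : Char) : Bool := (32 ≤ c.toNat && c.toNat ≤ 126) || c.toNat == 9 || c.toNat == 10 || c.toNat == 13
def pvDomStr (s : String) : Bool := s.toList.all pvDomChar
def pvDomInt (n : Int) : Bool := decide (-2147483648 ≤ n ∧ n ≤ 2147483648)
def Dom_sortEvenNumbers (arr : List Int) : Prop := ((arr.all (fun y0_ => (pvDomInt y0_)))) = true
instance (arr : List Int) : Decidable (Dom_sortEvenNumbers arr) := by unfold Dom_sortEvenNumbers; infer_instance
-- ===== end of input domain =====

-- B re-implements A with a hand-written top-down merge sort of the even values and a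
-- back-to-front assembly pass (alternative decomposition, same asymptotic cost).

-- ===== PORT A =====
-- literal port of A; sorted_numbers[index] is ported with pyGetD: the index is
-- always in range (the loop consumes exactly one sorted value per even element),
-- so this is exact.
def sortEvenNumbers (arr : List Int) : List Int :=
  let even_numbers := arr.filter (fun num => PySem.Int.mod num 2 == 0)
  let sorted_numbers := PySem.List.sorted even_numbers (fun x => x)
  (arr.foldl
    (fun (st : List Int × Int) num =>
      if PySem.Int.mod num 2 == 0 then
        (st.1 ++ [PySem.List.pyGetD sorted_numbers st.2 0], st.2 + 1)
      else
        (st.1 ++ [num], st.2))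
    ([], 0)).1

-- ===== PORT B =====
-- literal port of Source B's inner `merge`: the while loop over indices i, j; on exit the
-- two extend calls append xs[i:] and ys[j:].
def bMergeGo (xs ys : List Int) (i j : Nat) (out : List Int) : List Int :=
  if hij : i < xs.length ∧ j < ys.length then
    if ys[j] < xs[i] then bMergeGo xs ys i (j + 1) (out ++ [ys[j]])
    else bMergeGo xs ys (i + 1) j (out ++ [xs[i]])
  else out ++ xs.drop i ++ ys.drop j
termination_by (xs.length - i) + (ys.length - j)
decreasing_by
  · exact Nat.add_lt_add_left (Nat.sub_succ_lt_self _ _ hij.2) _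
  · exact Nat.add_lt_add_right (Nat.sub_succ_lt_self _ _ hij.1) _

def bMerge (xs ys : List Int) : List Int := bMergeGo xs ys 0 0 []

-- literal port of Source B's `msort`; xs[:mid] / xs[mid:] with 0 ≤ mid ≤ len(xs) are
-- exactly take/drop (PySem slice_to / slice_from); len(xs)//2 on a Nat is Nat division.
def bMsort (xs : List Int) : List Int :=
  if h : xs.length < 2 then xs
  else bMerge (bMsort (xs.take (xs.length / 2))) (bMsort (xs.drop (xs.length / 2)))
termination_by xs.length
decreasing_by
  · exact Nat.lt_of_le_of_lt (List.length_take_le _ _)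
      (Nat.div_lt_self (Nat.lt_of_lt_of_le Nat.zero_lt_two (Nat.le_of_not_lt h)) Nat.one_lt_two)
  · simpa using Nat.sub_lt (Nat.lt_of_lt_of_le Nat.zero_lt_two (Nat.le_of_not_lt h))
      (Nat.div_pos (Nat.le_of_not_lt h) Nat.zero_lt_two)

-- literal port of Source B's body; `for x in reversed(arr)` is a fold over arr.reverse;
-- evens.pop() is PySem.List.pop? evens (-1) (Python's default index); its none case
-- is Python's IndexError on an empty list, which this loop never reaches (one even
-- value per even slot) — ported as keeping the state, unreachable here.
def sortEvenNumbers_alt (arr : List Int) : List Int :=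
  let evens := bMsort (arr.filter (fun x => PySem.Int.mod x 2 == 0))
  let st := arr.reverse.foldl
    (fun (st : List Int × List Int) x =>
      if PySem.Int.mod x 2 == 0 then
        match PySem.List.pop? st.2 (-1) with
        | some (v, rest) => (st.1 ++ [v], rest)
        | none => st
      else (st.1 ++ [x], st.2))
    ([], evens)
  st.1.reverse

-- ===== PRECONDITION & SPEC =====
def Spec_sortEvenNumbers (arr : List Int) (out : List Int) : Prop := out = sortEvenNumbers_alt arr
instance (arr : List Int) (out : List Int) : Decidable (Spec_sortEvenNumbers arr out) := by unfold Spec_sortEvenNumbers; infer_instance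

-- ===== CLAIM (what is proved, stated in full; the proofs are below) =====
def Claim_equal_sortEvenNumbers : Prop := ∀ (arr : List Int), Dom_sortEvenNumbers arr → Spec_sortEvenNumbers arr (sortEvenNumbers arr)

-- ===== LEMMAS AND PROOFS =====

-- common description of both results: walk the input, replacing even elements by
-- successive elements of `es` (the sorted even values)
def pvMerge : List Int → List Int → List Int
  | [], _ => []
  | x :: xs, es =>
    if PySem.Int.mod x 2 == 0 then es.getD 0 0 :: pvMerge xs es.tail
    else x :: pvMerge xs es

-- structural reference merge used to reason about bMergeGo
def pvMrg : List Int → List Int → List Int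
  | [], ys => ys
  | xs, [] => xs
  | a :: as, b :: bs => if b < a then b :: pvMrg (a :: as) bs else a :: pvMrg as (b :: bs)

theorem pvMrg_nil_left (ys : List Int) : pvMrg [] ys = ys := by cases ys <;> simp [pvMrg]

theorem pvMrg_nil_right (xs : List Int) : pvMrg xs [] = xs := by cases xs <;> simp [pvMrg]

theorem pvMrg_cons_cons (a b : Int) (as bs : List Int) :
    pvMrg (a :: as) (b :: bs) = if b < a then b :: pvMrg (a :: as) bs else a :: pvMrg as (b :: bs) := by
  simp [pvMrg]

theorem pv_mergeGo_eq (xs ys : List Int) : ∀ i j out,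
    bMergeGo xs ys i j out = out ++ pvMrg (xs.drop i) (ys.drop j) := by
  intro i j out
  fun_induction bMergeGo xs ys i j out with
  | case1 i j out hij hlt ih =>
    rw [ih]
    conv_rhs => rw [List.drop_eq_getElem_cons hij.1, List.drop_eq_getElem_cons hij.2,
      pvMrg_cons_cons, if_pos hlt, ← List.drop_eq_getElem_cons hij.1]
    simp
  | case2 i j out hij hlt ih =>
    rw [ih]
    conv_rhs => rw [List.drop_eq_getElem_cons hij.1, List.drop_eq_getElem_cons hij.2,
      pvMrg_cons_cons, if_neg hlt, ← List.drop_eq_getElem_cons hij.2]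
    simp
  | case3 i j out hij =>
    rcases Decidable.not_and_iff_or_not.mp hij with h | h
    · have hx : xs.drop i = [] := List.drop_eq_nil_of_le (by omega)
      rw [hx, pvMrg_nil_left]
      simp
    · have hy : ys.drop j = [] := List.drop_eq_nil_of_le (by omega)
      rw [hy, pvMrg_nil_right]
      simp

theorem pv_mrg_perm : ∀ (xs ys : List Int), (pvMrg xs ys).Perm (xs ++ ys) := by
  intro xs ys
  fun_induction pvMrg xs ys with
  | case1 ys => simp
  | case2 xs h => simp
  | case3 a as b bs h ih =>
    exact (ih.cons b).trans (List.perm_middle).symm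
  | case4 a as b bs h ih =>
    simpa using ih.cons a

theorem pv_mrg_sorted : ∀ (xs ys : List Int), xs.Pairwise (· ≤ ·) → ys.Pairwise (· ≤ ·) →
    (pvMrg xs ys).Pairwise (· ≤ ·) := by
  intro xs ys
  fun_induction pvMrg xs ys with
  | case1 ys => intro _ hy; simpa [pvMrg_nil_left] using hy
  | case2 xs h => intro hx _; simpa [pvMrg_nil_right] using hx
  | case3 a as b bs h ih =>
    intro hx hy
    have hmem : ∀ z ∈ pvMrg (a :: as) bs, b ≤ z := by
      intro z hz
      have hz' := (pv_mrg_perm (a :: as) bs).mem_iff.mp hz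
      rcases List.mem_append.mp hz' with h1 | h1
      · rcases List.mem_cons.mp h1 with rfl | h1
        · omega
        · have := (List.pairwise_cons.mp hx).1 z h1; omega
      · exact (List.pairwise_cons.mp hy).1 z h1
    exact List.pairwise_cons.mpr ⟨hmem, ih hx (List.pairwise_cons.mp hy).2⟩
  | case4 a as b bs h ih =>
    intro hx hy
    have hmem : ∀ z ∈ pvMrg as (b :: bs), a ≤ z := by
      intro z hz
      have hz' := (pv_mrg_perm as (b :: bs)).mem_iff.mp hz
      rcases List.mem_append.mp hz' with h1 | h1
      · exact (List.pairwise_cons.mp hx).1 z h1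
      · rcases List.mem_cons.mp h1 with rfl | h1
        · omega
        · have := (List.pairwise_cons.mp hy).1 z h1; omega
    exact List.pairwise_cons.mpr ⟨hmem, ih (List.pairwise_cons.mp hx).2 hy⟩

theorem pv_merge_eq (xs ys : List Int) : bMerge xs ys = pvMrg xs ys := by
  simpa using pv_mergeGo_eq xs ys 0 0 []

theorem pv_msort_perm (xs : List Int) : (bMsort xs).Perm xs := by
  fun_induction bMsort xs with
  | case1 xs h => exact List.Perm.refl xs
  | case2 xs h ih1 ih2 =>
    rw [pv_merge_eq]
    have := (pv_mrg_perm _ _).trans (ih1.append ih2)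
    simpa [List.take_append_drop] using this

theorem pv_msort_sorted (xs : List Int) : (bMsort xs).Pairwise (· ≤ ·) := by
  fun_induction bMsort xs with
  | case1 xs h =>
    rcases xs with _ | ⟨a, _ | ⟨b, t⟩⟩
    · simp
    · simp
    · simp at h
  | case2 xs h ih1 ih2 =>
    rw [pv_merge_eq]
    exact pv_mrg_sorted _ _ ih1 ih2

-- B's msort computes exactly Python's sorted() of the same list
theorem pv_msort_eq_sorted (xs : List Int) :
    bMsort xs = PySem.List.sorted xs (fun x => x) := by
  exact (PySem.List.sorted_id_eq_of_perm_of_pairwise _ _ (pv_msort_perm xs)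
    (pv_msort_sorted xs)).symm

-- A's loop produces pvMerge
theorem pv_aloop (es : List Int) (xs : List Int) : ∀ (res : List Int) (j : Nat),
    j + (xs.filter (fun n => PySem.Int.mod n 2 == 0)).length ≤ es.length →
    (xs.foldl
      (fun (st : List Int × Int) num =>
        if PySem.Int.mod num 2 == 0 then
          (st.1 ++ [PySem.List.pyGetD es st.2 0], st.2 + 1)
        else
          (st.1 ++ [num], st.2))
      (res, (j : Int))).1
    = res ++ pvMerge xs (es.drop j) := by
  induction xs with
  | nil => intro res j _; simp [pvMerge]
  | cons x xs ih =>
    intro res j hlen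
    by_cases h : (2:Int) ∣ x
    · have hj : j < es.length := by simp [h] at hlen; omega
      have hrec := ih (res ++ [PySem.List.pyGetD es (j : Int) 0]) (j + 1)
        (by simp [h] at hlen ⊢; omega)
      simp [List.getD_eq_getElem?_getD] at hrec
      simp [h, pvMerge, List.getElem?_drop, List.tail_drop,
        List.getD_eq_getElem?_getD, hrec]
    · have hrec := ih (res ++ [x]) j (by simpa [List.filter_cons, h] using hlen)
      simp at hrec
      simp [h, pvMerge, hrec]

-- B's reversed-traversal loop: processing xs back to front, popping from the back
-- of the pool p ++ q (with exactly |q| = number of evens of xs), yields the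
-- reversed pvMerge of xs against q and leaves p.
theorem pv_bloop (xs : List Int) : ∀ (p q out0 : List Int),
    q.length = (xs.filter (fun n => PySem.Int.mod n 2 == 0)).length →
    List.foldr
      (fun x (st : List Int × List Int) =>
        if PySem.Int.mod x 2 == 0 then
          match PySem.List.pop? st.2 (-1) with
          | some (v, rest) => (st.1 ++ [v], rest)
          | none => st
        else (st.1 ++ [x], st.2))
      (out0, p ++ q) xs
    = (out0 ++ (pvMerge xs q).reverse, p) := by
  induction xs with
  | nil =>
    intro p q out0 hq
    have : q = [] := List.eq_nil_of_length_eq_zero (by simpa using hq)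
    simp [this, pvMerge]
  | cons x xs ih =>
    intro p q out0 hq
    by_cases h : (2:Int) ∣ x
    · have hq1 : q.length = (xs.filter (fun n => PySem.Int.mod n 2 == 0)).length + 1 := by
        simpa [List.filter_cons, h] using hq
      cases q with
      | nil => simp at hq1
      | cons v q' =>
        have hrec := ih (p ++ [v]) q' out0 (by simpa using hq1)
        simp only [List.foldr_cons, List.append_assoc, List.cons_append,
          List.nil_append] at hrec ⊢
        rw [hrec]
        simp [h, pvMerge, PySem.List.pop?_last]
    · have hrec := ih p q out0 (by simpa [List.filter_cons, h] using hq)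
      simp only [List.foldr_cons] at hrec ⊢
      rw [hrec]
      simp [h, pvMerge]

-- ===== VERDICT (by name: the statement is the Claim_ definition above) =====
theorem sortEvenNumbers_spec : Claim_equal_sortEvenNumbers := by
  intro arr _
  unfold Spec_sortEvenNumbers
  simp only [sortEvenNumbers, sortEvenNumbers_alt, pv_msort_eq_sorted, List.foldl_reverse]
  set S := PySem.List.sorted (arr.filter (fun n => PySem.Int.mod n 2 == 0)) (fun x => x) with hS
  have hlen : S.length = (arr.filter (fun n => PySem.Int.mod n 2 == 0)).length := by
    simp [hS, PySem.List.length_sorted]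
  have hA := pv_aloop S arr [] 0 (by simp [hlen])
  have hB := pv_bloop arr [] S [] hlen
  simp only [Int.natCast_zero, List.nil_append, List.drop_zero] at hA
  simp only [List.nil_append] at hB
  rw [hA, hB]
  simp
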